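-- pv_equiv track=rewrite | github.com/Louis-26/RLHF-route-design | code/test_files/test_4.py | find_stuck_point
-- ===== SOURCE A (Python) =====
-- def find_stuck_point(route):
--     result = []
--     count_dict = {}
--     for node in route:
--         count_dict[node] = count_dict.get(node, 0) + 1
--     for key, val in count_dict.items():
--         if val >= 3:
--             result.append(key)
--     # if there is no stuck point, return None
--     if len(result) == 0:
--         result = None
--     # determine the stuck node order
--     else:
--         temp = []
--         for node in result:
--             order_in_route = route.index(node)
--             temp.append((order_in_route, node))
--         temp=sorted(temp)
--         result=[i[1] for i in temp]
--     return result
-- ===== SOURCE B (Python) =====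
-- def find_stuck_point(route):
--     counts = {}
--     for node in route:
--         if node in counts:
--             counts[node] += 1
--         else:
--             counts[node] = 1
--     stuck = []
--     seen = set()
--     for node in route:
--         if node not in seen:
--             seen.add(node)
--             if counts[node] >= 3:
--                 stuck.append(node)
--     return stuck or None
-- ===== Notes on version B (the rewrite author's own statement) =====
-- stated objective: faster
-- what changed: Replaces the dict-items filter plus per-node route.index lookups and a sort with a single second pass over the route guarded by a seen-set, which emits stuck nodes directly in first-appearance order.
import Mathlib
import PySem

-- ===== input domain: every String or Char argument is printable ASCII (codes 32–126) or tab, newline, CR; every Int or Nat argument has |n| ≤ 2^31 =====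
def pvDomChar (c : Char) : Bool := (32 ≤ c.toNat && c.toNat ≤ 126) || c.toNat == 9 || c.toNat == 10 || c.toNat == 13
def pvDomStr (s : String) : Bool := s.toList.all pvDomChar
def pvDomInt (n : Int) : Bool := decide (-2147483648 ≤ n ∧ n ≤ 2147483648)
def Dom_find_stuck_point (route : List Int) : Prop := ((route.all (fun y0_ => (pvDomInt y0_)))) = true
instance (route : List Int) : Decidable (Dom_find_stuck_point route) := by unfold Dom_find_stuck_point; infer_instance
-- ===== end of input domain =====

-- ===== PORT A =====
-- B re-implements A's "collect nodes with count >= 3, then order by route.index" as one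
-- seen-set pass over the route; objective: faster (no per-node .index scan, no sort).
-- In A, `route.index(node)` can never raise (every dict key comes from route), so the
-- port takes the index with a default that is never used (`(index? …).getD 0`).
def find_stuck_point (route : List Int) : Option (List Int) :=
  let count_dict : PySem.Dict Int Int :=
    route.foldl (fun d node => d.insert node (d.getD node 0 + 1)) PySem.Dict.empty
  let result : List Int :=
    count_dict.items.foldl (fun acc kv => if 3 ≤ kv.2 then acc ++ [kv.1] else acc) []
  if result.length = 0 then none
  else
    let temp : List (Int × Int) :=
      result.foldl (fun acc node =>
        acc ++ [((((PySem.List.index? route node).getD 0 : Nat) : Int), node)]) []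
    let temp2 := PySem.List.sorted2 temp (·.1) (·.2)
    some (temp2.map (·.2))

-- ===== PORT B =====
def find_stuck_point_alt (route : List Int) : Option (List Int) :=
  let counts : PySem.Dict Int Int :=
    route.foldl (fun d node =>
      if d.contains node then d.insert node (d.getD node 0 + 1) else d.insert node 1)
      PySem.Dict.empty
  let p : PySem.Set Int × List Int :=
    route.foldl (fun st node =>
      if PySem.Set.contains st.1 node then st
      else (PySem.Set.add st.1 node,
            if 3 ≤ counts.getD node 0 then st.2 ++ [node] else st.2))
      (PySem.Set.empty, [])
  if p.2 = [] then none else some p.2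

-- ===== PRECONDITION & SPEC =====
def Spec_find_stuck_point (route : List Int) (out : Option (List Int)) : Prop := out = find_stuck_point_alt route
instance (route : List Int) (out : Option (List Int)) : Decidable (Spec_find_stuck_point route out) := by unfold Spec_find_stuck_point; infer_instance

-- ===== CLAIM (what is proved, stated in full; the proofs are below) =====
def Claim_equal_find_stuck_point : Prop := ∀ (route : List Int), Dom_find_stuck_point route → Spec_find_stuck_point route (find_stuck_point route)

-- ===== LEMMAS AND PROOFS =====

-- B's counting loop (membership test + increment-or-init) builds the same dict as the
-- canonical counter fold.
theorem counts_eq_counter (route : List Int) :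
    route.foldl (fun d node =>
      if d.contains node then d.insert node (d.getD node 0 + 1) else d.insert node 1)
      PySem.Dict.empty = PySem.Dict.counter route := by
  rw [← PySem.Dict.foldl_insert_getD_add_one_eq_counter]
  apply PySem.List.foldl_congr_mem
  intro d n _
  by_cases h : d.contains n
  · simp [h]
  · simp [h, PySem.Dict.getD_of_not_contains d 0 (by simpa using h)]

-- updating a set with a list never looks at occurrences of an element already in the set
theorem update_filter_of_mem (m : List Int) : ∀ (s : PySem.Set Int) (x : Int), x ∈ s →
    PySem.Set.update s m = PySem.Set.update s (m.filter (fun b => !(b == x))) := by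
  induction m with
  | nil => intro s x _; rfl
  | cons y m ih =>
    intro s x hx
    by_cases hyx : y = x
    · subst hyx
      have hadd : PySem.Set.add s y = s := by
        simp [PySem.Set.add, PySem.Set.contains, hx]
      simp [PySem.Set.update, hadd] at *
      simpa [PySem.Set.update] using ih s y hx
    · have : (y == x) = false := by simp [hyx]
      simp only [PySem.Set.update, List.foldl_cons, List.filter_cons, this, Bool.not_false]
      exact ih (PySem.Set.add s y) x (by simp [PySem.Set.mem_add, hx])

-- two base sets agreeing on membership of the incoming elements receive the same suffix
theorem update_common_suffix (l : List Int) : ∀ (s t : PySem.Set Int),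
    (∀ b ∈ l, (b ∈ s ↔ b ∈ t)) →
    ∃ w, PySem.Set.update s l = s ++ w ∧ PySem.Set.update t l = t ++ w := by
  induction l with
  | nil => intro s t _; exact ⟨[], by simp [PySem.Set.update], by simp [PySem.Set.update]⟩
  | cons y l ih =>
    intro s t h
    by_cases hy : y ∈ s
    · have hyt : y ∈ t := (h y (by simp)).1 hy
      have hs : PySem.Set.add s y = s := by
        simp [PySem.Set.add, PySem.Set.contains, hy]
      have ht : PySem.Set.add t y = t := by
        simp [PySem.Set.add, PySem.Set.contains, hyt]
      obtain ⟨w, hw1, hw2⟩ := ih s t (fun b hb => h b (by simp [hb]))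
      exact ⟨w, by simpa [PySem.Set.update, hs] using hw1,
             by simpa [PySem.Set.update, ht] using hw2⟩
    · have hyt : y ∉ t := fun hc => hy ((h y (by simp)).2 hc)
      have hs : PySem.Set.add s y = s ++ [y] := by
        simp [PySem.Set.add, PySem.Set.contains, hy]
      have ht : PySem.Set.add t y = t ++ [y] := by
        simp [PySem.Set.add, PySem.Set.contains, hyt]
      obtain ⟨w, hw1, hw2⟩ := ih (s ++ [y]) (t ++ [y])
        (fun b hb => by simp [h b (by simp [hb])])
      exact ⟨y :: w, by simpa [PySem.Set.update, hs] using hw1,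
             by simpa [PySem.Set.update, ht] using hw2⟩

-- first-occurrence dedup, peeled one element at a time
theorem ofList_cons (x : Int) (m : List Int) :
    PySem.Set.ofList (x :: m) = x :: PySem.Set.ofList (m.filter (fun b => !(b == x))) := by
  have h1 : PySem.Set.ofList (x :: m) = PySem.Set.update [x] m := by
    simp [PySem.Set.ofList_eq_foldl, PySem.Set.update, PySem.Set.add]
  have h2 := update_filter_of_mem m [x] x (by simp)
  obtain ⟨w, hw1, hw2⟩ := update_common_suffix (m.filter (fun b => !(b == x))) [x] []
    (fun b hb => by
      have : b ≠ x := by simpa using (List.of_mem_filter hb)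
      simp [this])
  have h3 : PySem.Set.ofList (m.filter (fun b => !(b == x))) = w := by
    simpa [PySem.Set.ofList_eq_foldl, PySem.Set.update] using hw2
  rw [h1, h2, hw1, h3]
  rfl

-- the seen-set pass collects, in order, the first occurrences not yet seen that pass q
theorem scan_spec (q : Int → Prop) [DecidablePred q] (l : List Int) : ∀ (s : PySem.Set Int) (acc : List Int),
    (l.foldl (fun st node =>
      if PySem.Set.contains st.1 node then st
      else (PySem.Set.add st.1 node,
            if q node then st.2 ++ [node] else st.2)) (s, acc)).2
    = acc ++ (PySem.Set.ofList (l.filter (fun n => !PySem.Set.contains s n))).filter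
        (fun n => decide (q n)) := by
  induction l with
  | nil => intro s acc; simp [PySem.Set.ofList]
  | cons x l ih =>
    intro s acc
    by_cases h : PySem.Set.contains s x
    · simp only [List.foldl_cons, List.filter_cons, h, Bool.not_true]
      simpa using ih s acc
    · have hb : PySem.Set.contains s x = false := by simpa using h
      have hadd : PySem.Set.add s x = s ++ [x] := by
        simp [PySem.Set.add, PySem.Set.contains] at hb ⊢
        simp [hb]
      simp only [List.foldl_cons, if_neg h]
      rw [ih]
      have hfil : l.filter (fun n => !PySem.Set.contains (PySem.Set.add s x) n)
          = (l.filter (fun n => !PySem.Set.contains s n)).filter (fun n => !(n == x)) := by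
        rw [List.filter_filter]
        apply List.filter_congr
        intro n _
        simp [hadd, PySem.Set.contains, List.contains_eq_mem]
        rw [Bool.and_comm, Bool.beq_eq_decide_eq]
      rw [hfil]
      simp only [List.filter_cons, hb, Bool.not_false, if_pos trivial]
      rw [ofList_cons]
      by_cases hq : q x
      · simp [hq]
      · simp [hq]

-- the distinct elements in first-occurrence order have strictly increasing first indices
theorem ofList_pairwise_idxOf (xs : List Int) :
    (PySem.Set.ofList xs).Pairwise (fun a b => List.idxOf a xs < List.idxOf b xs) := by
  induction xs using List.reverseRecOn with
  | nil => simp [PySem.Set.ofList]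
  | append_singleton xs y ih =>
    have hof : PySem.Set.ofList (xs ++ [y]) = PySem.Set.add (PySem.Set.ofList xs) y := by
      simp [PySem.Set.ofList_eq_foldl, List.foldl_append]
    by_cases hy : y ∈ xs
    · have : PySem.Set.add (PySem.Set.ofList xs) y = PySem.Set.ofList xs := by
        simp [PySem.Set.add, PySem.Set.contains,
          PySem.Set.mem_ofList, hy]
      rw [hof, this]
      refine ih.imp_of_mem ?_
      intro a b ha hb hab
      have ha' : a ∈ xs := (PySem.Set.mem_ofList xs a).1 ha
      have hb' : b ∈ xs := (PySem.Set.mem_ofList xs b).1 hb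
      rwa [List.idxOf_append_of_mem ha', List.idxOf_append_of_mem hb']
    · have : PySem.Set.add (PySem.Set.ofList xs) y = PySem.Set.ofList xs ++ [y] := by
        simp [PySem.Set.add, PySem.Set.contains,
          PySem.Set.mem_ofList, hy]
      rw [hof, this]
      rw [List.pairwise_append]
      refine ⟨ih.imp_of_mem ?_, by simp, ?_⟩
      · intro a b ha hb hab
        have ha' : a ∈ xs := (PySem.Set.mem_ofList xs a).1 ha
        have hb' : b ∈ xs := (PySem.Set.mem_ofList xs b).1 hb
        rwa [List.idxOf_append_of_mem ha', List.idxOf_append_of_mem hb']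
      · intro a ha b hb
        have ha' : a ∈ xs := (PySem.Set.mem_ofList xs a).1 ha
        have hb' : b = y := by simpa using hb
        subst hb'
        rw [List.idxOf_append_of_mem ha', List.idxOf_append, if_neg hy]
        have := List.idxOf_lt_length_of_mem ha'
        simp
        omega

-- inserting a strictly-increasing sequence into an insertion sort leaves it unchanged
theorem foldl_insertBy_of_pairwise {α : Type} (before : α → α → Bool) (l : List α) :
    ∀ acc : List α, (acc ++ l).Pairwise (fun a b => before b a = false) →
    l.foldl (fun acc x => PySem.List.insertBy before x acc) acc = acc ++ l := by
  induction l with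
  | nil => intro acc _; simp
  | cons x l ih =>
    intro acc h
    have hins : PySem.List.insertBy before x acc = acc ++ [x] := by
      apply PySem.List.insertBy_of_forall_not_before
      intro y hy
      have := (List.pairwise_append.1 h).2.2 y hy x (by simp)
      exact this
    simp only [List.foldl_cons, hins]
    rw [ih (acc ++ [x]) (by simpa using h)]
    simp

theorem idxOf?_eq_some_of_mem (xs : List Int) (v : Int) (h : v ∈ xs) :
    List.idxOf? v xs = some (List.idxOf v xs) := by
  induction xs with
  | nil => cases h
  | cons x t ih =>
    by_cases hx : v = x
    · subst hx; simp [List.idxOf?_cons]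
    · have hv : v ∈ t := by cases h with | head => exact absurd rfl hx | tail _ h => exact h
      simp [List.idxOf?_cons, Ne.symm hx, ih hv]

-- ===== VERDICT (by name: the statement is the Claim_ definition above) =====
theorem result_a_eq (route : List Int) :
    (PySem.Dict.counter route).items.foldl
      (fun acc kv => if 3 ≤ kv.2 then acc ++ [kv.1] else acc) []
    = (PySem.Set.ofList route).filter (fun k => decide (3 ≤ (route.count k : Int))) := by
  rw [PySem.List.foldl_append_ite (p := fun kv : Int × Int => 3 ≤ kv.2) (f := Prod.fst)]
  rw [PySem.Dict.items_counter, List.filter_map, List.map_map]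
  simp [Function.comp_def]

theorem find_stuck_point_spec : Claim_equal_find_stuck_point := by
  intro route _
  simp only [Spec_find_stuck_point, find_stuck_point, find_stuck_point_alt]
  rw [counts_eq_counter, PySem.Dict.foldl_insert_getD_add_one_eq_counter,
    result_a_eq, scan_spec]
  have hq : (fun n : Int => decide (3 ≤ (PySem.Dict.counter route).getD n 0))
      = (fun k : Int => decide (3 ≤ (route.count k : Int))) := by
    funext n; rw [PySem.Dict.getD_counter]
  simp only [List.nil_append, PySem.Set.empty, PySem.Set.contains, List.contains_nil,
    Bool.not_false, List.filter_true, hq]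
  set res := (PySem.Set.ofList route).filter (fun k => decide (3 ≤ (route.count k : Int))) with hres
  by_cases hempty : res = []
  · simp [hempty]
  · rw [if_neg (by simpa [List.length_eq_zero_iff] using hempty), if_neg hempty]
    congr 1
    rw [PySem.List.foldl_append_singleton_eq_map
      (f := fun node => ((((PySem.List.index? route node).getD 0 : Nat) : Int), node))]
    simp only [List.nil_append]
    have hmap : res.map (fun node => ((((PySem.List.index? route node).getD 0 : Nat) : Int), node))
        = res.map (fun node => ((List.idxOf node route : Int), node)) := by
      apply List.map_congr_left
      intro n hn
      have hn' : n ∈ route := (PySem.Set.mem_ofList route n).1 (List.mem_of_mem_filter hn)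
      rw [PySem.List.index?_eq_idxOf?, idxOf?_eq_some_of_mem route n hn']
      rfl
    rw [hmap]
    have hpair : (res.map (fun node => ((List.idxOf node route : Int), node))).Pairwise
        (fun a b => a.1 < b.1) := by
      rw [List.pairwise_map]
      exact ((ofList_pairwise_idxOf route).filter _).imp (fun h => by simpa using h)
    have hsorted : PySem.List.sorted2
        (res.map (fun node => ((List.idxOf node route : Int), node))) (·.1) (·.2)
        = res.map (fun node => ((List.idxOf node route : Int), node)) := by
      simp only [PySem.List.sorted2]
      exact foldl_insertBy_of_pairwise _ _ []
        (by simpa using hpair.imp (fun {a b} h => by simp [h, le_of_lt h]))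
    rw [hsorted]
    simp [List.map_map, Function.comp_def]
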